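-- pv_equiv track=rewrite | github.com/Soup-tech/DragonBreath | src/Suite-Analysis/vuln-software/results.py | parseContext
-- ===== SOURCE A (Python) =====
-- def parseContext(line):
-- 	comma_split = line.split(",")
--
-- 	for i in range(len(comma_split) - 1, 0, -1):
-- 		 # Iterating backwards through the list until it hits something with CWE
-- 		 # Then rebuilds up the the signature
-- 		if ('CWE' in comma_split[i]):
-- 			context = comma_split[i+1:-1]
-- 			context = ",".join(context)
-- 			context = context.strip('"').strip()
-- 			return '"' + context + '"'
-- ===== SOURCE B (Python) =====
-- def parseContext(line):
--     # String-level: never splits the line; locates the last 'CWE' occurrence and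
--     # cuts the context out between the following comma and the last comma.
--     pos = line.rfind('CWE')
--     if pos == -1:
--         return None
--     tail = line[pos + 3:]
--     j = tail.find(',')
--     if j == -1:
--         context = ''
--     else:
--         context = tail[j + 1:tail.rfind(',')]
--     return '"' + context.strip('"').strip() + '"'
-- ===== Notes on version B (the rewrite author's own statement) =====
-- stated objective: alternative
-- what changed: B never splits the line into fields: it locates the last occurrence of the CWE marker with rfind and cuts the context directly out of the original string between the first comma after that occurrence and the last comma, instead of A's backward scan over the comma-split field list followed by a join of the selected fields.
-- intended difference: On lines whose first comma-separated field is the only one containing the CWE marker, A returns None because its backward loop stops before index 0; B returns the quoted context after that field, which is the intended result of extracting the context after the last CWE field. — e.g. on parseContext("CWE,x,y"): A returns none, B returns some "\"x\""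
import Mathlib
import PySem

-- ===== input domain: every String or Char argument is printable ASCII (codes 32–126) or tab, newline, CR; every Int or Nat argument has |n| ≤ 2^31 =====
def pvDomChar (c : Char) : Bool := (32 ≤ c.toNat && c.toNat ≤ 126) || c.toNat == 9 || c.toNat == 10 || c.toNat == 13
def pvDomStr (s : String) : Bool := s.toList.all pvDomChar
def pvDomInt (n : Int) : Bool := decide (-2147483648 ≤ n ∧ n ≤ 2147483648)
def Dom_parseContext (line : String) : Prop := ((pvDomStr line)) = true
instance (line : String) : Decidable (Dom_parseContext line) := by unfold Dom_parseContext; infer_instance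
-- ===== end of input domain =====

-- B never splits the line into fields: it locates the last occurrence of the CWE marker with rfind
-- and slices the context straight out of the string between the next comma and the last comma
-- (objective: alternative); it also finds the marker in field 0, which A's backward loop skips —
-- see D_parseContext below.

-- ===== PORT A =====
-- context = ",".join(comma_split[i+1:-1]).strip('"').strip(); return '"' + context + '"'
def pvAssemble (cs : List String) (i : Int) : String :=
  "\"" ++ PySem.Str.strip (PySem.Str.stripChars
    (PySem.Str.join "," (PySem.List.slice cs (some (i + 1)) (some (-1)))) "\"") ++ "\""

-- the backward loop 'for i in range(len(comma_split)-1, 0, -1)', i = n while it recurses on n-1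
def parseContextLoop (cs : List String) : Nat → Option String
  | 0 => none
  | n + 1 =>
    if PySem.Str.isIn "CWE" (PySem.List.pyGetD cs ((n : Int) + 1) "") then
      some (pvAssemble cs ((n : Int) + 1))
    else parseContextLoop cs n

def parseContext (line : String) : Option String :=
  let cs := (PySem.Str.split? line ",").getD []
  parseContextLoop cs (cs.length - 1)

-- ===== PORT B =====
-- pos = line.rfind('CWE'); tail = line[pos+3:]; j = tail.find(',');
-- context = '' if j == -1 else tail[j+1:tail.rfind(',')]
def parseContext_alt (line : String) : Option String :=
  let pos := PySem.Str.rfind line "CWE"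
  if pos = -1 then none
  else
    let tail := PySem.Str.slice line (some (pos + 3)) none
    let j := PySem.Str.find tail ","
    let context := if j = -1 then "" else
      PySem.Str.slice tail (some (j + 1)) (some (PySem.Str.rfind tail ","))
    some ("\"" ++ PySem.Str.strip (PySem.Str.stripChars context "\"") ++ "\"")

-- ===== PRECONDITION & SPEC =====
-- On lines where the first comma-separated field is the only one containing the CWE marker, A returns
-- None because its backward loop stops before index 0; B returns the quoted context after that field,
-- which is the intended result of extracting the context after the last CWE field.
def D_parseContext (line : String) : Prop :=
  let hits := ((PySem.Str.split? line ",").getD []).map (PySem.Str.isIn "CWE")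
  hits = true :: List.replicate (hits.length - 1) false
instance (line : String) : Decidable (D_parseContext line) := by unfold D_parseContext; infer_instance

def Spec_parseContext (line : String) (out : Option String) : Prop := ¬ D_parseContext line → out = parseContext_alt line
instance (line : String) (out : Option String) : Decidable (Spec_parseContext line out) := by unfold Spec_parseContext; infer_instance

def pvDiffWitness_parseContext : String := "CWE,x,y"
def pvDiffWitnessOut_parseContext : (Option String) × (Option String) := (none, some "\"x\"")

-- ===== CLAIM (what is proved, stated in full; the proofs are below) =====
def Claim_unchanged_parseContext : Prop := ∀ (line : String), Dom_parseContext line → Spec_parseContext line (parseContext line)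
def Claim_changed_parseContext : Prop := Dom_parseContext (pvDiffWitness_parseContext) ∧ D_parseContext (pvDiffWitness_parseContext) ∧ parseContext (pvDiffWitness_parseContext) = pvDiffWitnessOut_parseContext.1 ∧ parseContext_alt (pvDiffWitness_parseContext) = pvDiffWitnessOut_parseContext.2 ∧ pvDiffWitnessOut_parseContext.1 ≠ pvDiffWitnessOut_parseContext.2
def Claim_exact_parseContext : Prop := ∀ (line : String), Dom_parseContext line → D_parseContext line → parseContext line ≠ parseContext_alt line

-- ===== LEMMAS AND PROOFS =====

-- ---------- the A-side machinery (characterising the backward loop as a last-hit fold) ----------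

-- a 'keep the last index satisfying p' fold: its result with any start value, from its result started at none
theorem foldl_lastIf (p : Int → Bool) (l : List Int) (a : Option Int) :
    l.foldl (fun acc i => if p i then some i else acc) a
      = (l.foldl (fun acc i => if p i then some i else acc) none).elim a some := by
  induction l generalizing a with
  | nil => rfl
  | cons x t ih =>
    simp only [List.foldl_cons]
    rw [ih, ih (if p x then some x else none)]
    cases h : t.foldl (fun acc i => if p i then some i else acc) none <;>
      by_cases hp : p x <;> simp [hp]

theorem foldl_lastIf_none_iff (p : Int → Bool) (l : List Int) :
    l.foldl (fun acc i => if p i then some i else acc) none = none ↔ ∀ i ∈ l, p i = false := by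
  induction l with
  | nil => simp
  | cons x t ih =>
    simp only [List.foldl_cons]
    rw [foldl_lastIf]
    constructor
    · intro hc
      cases h : t.foldl (fun acc i => if p i then some i else acc) none with
      | some j => rw [h] at hc; simp at hc
      | none =>
        rw [h] at hc
        simp only [Option.elim] at hc
        intro i hi
        rcases List.mem_cons.mp hi with rfl | hmem
        · by_contra hp
          simp [(Bool.not_eq_false _).mp hp] at hc
        · exact ih.mp h i hmem
    · intro hall
      have ht := ih.mpr (fun i hi => hall i (List.mem_cons_of_mem _ hi))
      rw [ht]
      simp [hall x (by simp : x ∈ x :: t)]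

-- the change region, unfolded to the index form the main proofs use
theorem D_parseContext_iff (line : String) :
    D_parseContext line ↔
      (PySem.Str.isIn "CWE" (((PySem.Str.split? line ",").getD []).getD 0 "") = true ∧
       ∀ i : Nat, i < ((PySem.Str.split? line ",").getD []).length → 1 ≤ i →
         PySem.Str.isIn "CWE" (((PySem.Str.split? line ",").getD []).getD i "") = false) := by
  unfold D_parseContext
  cases hcs : (PySem.Str.split? line ",").getD [] with
  | nil =>
    constructor
    · intro h
      simp at h
    · rintro ⟨h, -⟩
      exact absurd h (by decide)
  | cons a t =>
    simp only [List.map_cons, List.length_map, List.length_cons, Nat.add_sub_cancel,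
      List.cons.injEq, List.getD_cons_zero]
    constructor
    · rintro ⟨ha, ht⟩
      refine ⟨ha, ?_⟩
      intro i hi h1
      obtain ⟨j, rfl⟩ : ∃ j : Nat, i = j + 1 := ⟨i - 1, by omega⟩
      rw [List.getD_cons_succ]
      have hj : j < t.length := by simpa using hi
      have : t.map (PySem.Str.isIn "CWE") = List.replicate (t.map (PySem.Str.isIn "CWE")).length false := by
        simpa using ht
      rw [List.getD_eq_getElem t "" hj]
      exact (List.eq_replicate_iff.mp this).2 _ (List.mem_map_of_mem (t.getElem_mem hj))
    · rintro ⟨ha, hall⟩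
      refine ⟨ha, ?_⟩
      rw [List.eq_replicate_iff]
      refine ⟨by simp, ?_⟩
      intro b hb
      rw [List.mem_map] at hb
      obtain ⟨s, hs, rfl⟩ := hb
      obtain ⟨j, hj, rfl⟩ := List.mem_iff_getElem.mp hs
      have := hall (j + 1) (by simpa using hj) (by omega)
      rwa [List.getD_cons_succ, List.getD_eq_getElem t "" hj] at this

-- A's backward first-hit loop over 1..n is the forward last-hit fold over pyRange 1 (n+1)
theorem parseContextLoop_eq_foldl (cs : List String) (n : Nat) :
    parseContextLoop cs n =
      ((PySem.List.pyRange 1 ((n : Int) + 1)).foldl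
        (fun acc i => if PySem.Str.isIn "CWE" (PySem.List.pyGetD cs i "") then some i else acc)
        none).elim none (fun i => some (pvAssemble cs i)) := by
  induction n with
  | zero => simp [parseContextLoop, PySem.List.pyRange]
  | succ n ih =>
    have hc : (((n + 1 : Nat)) : Int) + 1 = (n : Int) + 1 + 1 := by push_cast; ring
    rw [hc, PySem.List.pyRange_one_append 1 ((n : Int) + 1) ((n : Int) + 1 + 1) (by omega) (by omega),
      List.foldl_append]
    have hsing : PySem.List.pyRange ((n : Int) + 1) ((n : Int) + 1 + 1) = [(n : Int) + 1] := by
      rw [PySem.List.pyRange_one_cons (by omega)]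
      simp [PySem.List.pyRange]
    rw [hsing]
    simp only [parseContextLoop, List.foldl_cons, List.foldl_nil]
    split_ifs with h
    · simp
    · exact ih

-- A's value, characterised by the last-hit fold over indices 1..len-1
theorem parseContext_char (line : String) :
    parseContext line =
      ((PySem.List.pyRange 1 (((PySem.Str.split? line ",").getD []).length)).foldl
        (fun acc i => if PySem.Str.isIn "CWE" (PySem.List.pyGetD ((PySem.Str.split? line ",").getD []) i "") then some i else acc)
        none).elim none (fun i => some (pvAssemble ((PySem.Str.split? line ",").getD []) i)) := by
  unfold parseContext
  dsimp only
  rw [parseContextLoop_eq_foldl]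
  rcases Nat.eq_zero_or_pos ((PySem.Str.split? line ",").getD []).length with h | h
  · rw [h]; norm_num [PySem.List.pyRange]
  · have hlen : (((((PySem.Str.split? line ",").getD []).length - 1 : Nat)) : Int) + 1
        = (((PySem.Str.split? line ",").getD []).length : Int) := by omega
    rw [hlen]

-- ---------- the B-side machinery: rfind/find specs, split structure, and the master lemma ----------

-- last index of a field containing 'CWE' (List Char level / List String level)
def lastHitC : List (List Char) → Option Nat
  | [] => none
  | f :: rest =>
    match lastHitC rest with
    | some i => some (i + 1)
    | none => if PySem.Chars.isIn ['C', 'W', 'E'] f then some 0 else none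

def lastHitS : List String → Option Nat
  | [] => none
  | f :: rest =>
    match lastHitS rest with
    | some i => some (i + 1)
    | none => if PySem.Str.isIn "CWE" f then some 0 else none

-- B's core on code points: the tail after the last 'CWE', and the raw context cut from it
def bcoreTail (cs : List Char) : List Char :=
  PySem.List.slice cs (some (PySem.Chars.rfind cs ['C', 'W', 'E'] + 3)) none

def bcoreCtx (tail : List Char) : List Char :=
  if PySem.Chars.find tail [','] = -1 then [] else
    PySem.List.slice tail (some (PySem.Chars.find tail [','] + 1))
      (some (PySem.Chars.rfind tail [',']))

def bcoreC (cs : List Char) : Option (List Char) :=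
  if PySem.Chars.rfind cs ['C', 'W', 'E'] = -1 then none
  else some (bcoreCtx (bcoreTail cs))

-- ----- rfind: a complete first-principles spec of the backward scan -----

theorem rfind_go_cases (s sub : List Char) (k : Nat) :
    (PySem.Chars.rfind.go s sub k = -1 ∧ ∀ j ≤ k, ¬ sub <+: s.drop j) ∨
    (∃ j, j ≤ k ∧ PySem.Chars.rfind.go s sub k = (j : Int) ∧ sub <+: s.drop j ∧
      ∀ j', j < j' → j' ≤ k → ¬ sub <+: s.drop j') := by
  induction k with
  | zero =>
    rw [PySem.Chars.rfind.go]
    by_cases h : sub.isPrefixOf s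
    · right
      exact ⟨0, le_refl _, by simp [h], by simpa [List.isPrefixOf_iff_prefix] using h, by omega⟩
    · left
      refine ⟨by simp [h], ?_⟩
      intro j hj
      interval_cases j
      simpa [List.isPrefixOf_iff_prefix] using h
  | succ k ih =>
    rw [PySem.Chars.rfind.go]
    by_cases h : sub.isPrefixOf (s.drop (k+1))
    · right
      refine ⟨k + 1, le_refl _, by push_cast; simp [h],
        by simpa [List.isPrefixOf_iff_prefix] using h, ?_⟩
      intro j' h1 h2
      omega
    · have hnp : ¬ sub <+: s.drop (k+1) := by simpa [List.isPrefixOf_iff_prefix] using h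
      rcases ih with ⟨he, hall⟩ | ⟨j, hj, he, hp, hmax⟩
      · left
        refine ⟨by simp [h, he], ?_⟩
        intro j hjk
        rcases Nat.lt_or_ge j (k+1) with hlt | hge
        · exact hall j (by omega)
        · have : j = k + 1 := by omega
          subst this; exact hnp
      · right
        refine ⟨j, by omega, by simp [h, he], hp, ?_⟩
        intro j' h1 h2
        rcases Nat.lt_or_ge j' (k+1) with hlt | hge
        · exact hmax j' h1 (by omega)
        · have : j' = k + 1 := by omega
          subst this; exact hnp

theorem drop_prefix_imp_le (s sub : List Char) (h : sub ≠ []) (j : Nat) (hp : sub <+: s.drop j) : j ≤ s.length := by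
  by_contra hc
  rw [List.drop_eq_nil_of_le (by omega)] at hp
  exact h (List.prefix_nil.mp hp)

theorem rfind_eq_neg_one_iff' (s sub : List Char) (h : sub ≠ []) :
    PySem.Chars.rfind s sub = -1 ↔ ∀ j : Nat, ¬ sub <+: s.drop j := by
  unfold PySem.Chars.rfind
  rcases rfind_go_cases s sub s.length with ⟨he, hall⟩ | ⟨j, hj, he, hp, hmax⟩
  · rw [he]
    simp only [true_iff]
    intro j hp
    exact hall j (drop_prefix_imp_le s sub h j hp) hp
  · rw [he]
    constructor
    · intro hc; omega
    · intro hc; exact absurd hp (hc j)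

theorem rfind_spec' (s sub : List Char) (h : sub ≠ []) (hn : PySem.Chars.rfind s sub ≠ -1) :
    ∃ j : Nat, PySem.Chars.rfind s sub = (j : Int) ∧ sub <+: s.drop j ∧
      ∀ j' : Nat, j < j' → ¬ sub <+: s.drop j' := by
  unfold PySem.Chars.rfind at *
  rcases rfind_go_cases s sub s.length with ⟨he, _⟩ | ⟨j, hj, he, hp, hmax⟩
  · exact absurd he hn
  · refine ⟨j, he, hp, ?_⟩
    intro j' h1 hp'
    exact hmax j' h1 (drop_prefix_imp_le s sub h j' hp') hp'

theorem rfind_eq_of (s sub : List Char) (h : sub ≠ []) (j : Nat)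
    (h1 : sub <+: s.drop j) (h2 : ∀ j' : Nat, j < j' → ¬ sub <+: s.drop j') :
    PySem.Chars.rfind s sub = (j : Int) := by
  have hn : PySem.Chars.rfind s sub ≠ -1 := by
    intro hc
    exact ((rfind_eq_neg_one_iff' s sub h).mp hc) j h1
  obtain ⟨i, he, hp, hmax⟩ := rfind_spec' s sub h hn
  have : i = j := by
    rcases Nat.lt_trichotomy i j with hlt | rfl | hgt
    · exact absurd h1 (hmax j hlt)
    · rfl
    · exact absurd hp (h2 i hgt)
  rw [he, this]

theorem rfind_ne_neg_one_iff (s sub : List Char) (h : sub ≠ []) :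
    PySem.Chars.rfind s sub = -1 ↔ PySem.Chars.isIn sub s = false := by
  rw [rfind_eq_neg_one_iff' s sub h]
  rw [← Bool.not_eq_true, ← PySem.Chars.exists_prefix_drop_iff_isIn]
  constructor
  · intro hall ⟨j, hj⟩; exact hall j hj
  · intro hne j hj; exact hne ⟨j, hj⟩

-- ----- find: uniqueness from the existing spec -----

theorem single_prefix_drop (c : Char) (l : List Char) (j : Nat) :
    [c] <+: l.drop j ↔ l[j]? = some c := by
  rw [← List.head?_drop]
  cases h : l.drop j with
  | nil => simp
  | cons a t => simp [List.cons_prefix_cons, eq_comm]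

theorem find_eq_of (s sub : List Char) (j : Nat)
    (h1 : sub <+: s.drop j) (h2 : ∀ j' : Nat, j' < j → ¬ sub <+: s.drop j') :
    PySem.Chars.find s sub = (j : Int) := by
  have hin : PySem.Chars.isIn sub s = true := (PySem.Chars.exists_prefix_drop_iff_isIn sub s).mp ⟨j, h1⟩
  have hpos : 0 ≤ PySem.Chars.find s sub := by
    rw [PySem.Chars.find_nonneg_iff]
    exact (PySem.Chars.isIn_iff_infix sub s).mp hin
  obtain ⟨hp, hmin⟩ := PySem.Chars.find_spec hpos
  have : (PySem.Chars.find s sub).toNat = j := by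
    rcases Nat.lt_trichotomy (PySem.Chars.find s sub).toNat j with hlt | he | hgt
    · exact absurd hp (h2 _ hlt)
    · exact he
    · exact absurd h1 (hmin j hgt)
  omega

theorem find_comma_eq_neg_one (t : List Char) (h : ',' ∉ t) :
    PySem.Chars.find t [','] = -1 := by
  rw [PySem.Chars.find_eq_neg_one_iff]
  intro hin
  exact h (hin.subset (by simp))

theorem find_comma_append (g ys : List Char) (h : ',' ∉ g) :
    PySem.Chars.find (g ++ ',' :: ys) [','] = (g.length : Int) := by
  apply find_eq_of
  · rw [single_prefix_drop]
    simp
  · intro j hj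
    rw [single_prefix_drop]
    rw [List.getElem?_append_left hj]
    intro hc
    exact h (List.mem_of_getElem? hc)

theorem rfind_comma_eq_neg_one (t : List Char) (h : ',' ∉ t) :
    PySem.Chars.rfind t [','] = -1 := by
  rw [rfind_eq_neg_one_iff' t [','] (by simp)]
  intro j hc
  rw [single_prefix_drop] at hc
  exact h (List.mem_of_getElem? hc)

theorem occ_append_comma (sub : List Char) (hne : sub ≠ []) (hnc : ',' ∉ sub)
    (xs ys : List Char) (j : Nat) :
    sub <+: (xs ++ ',' :: ys).drop j ↔
      (sub <+: xs.drop j ∧ j + sub.length ≤ xs.length) ∨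
      (∃ m : Nat, j = xs.length + 1 + m ∧ sub <+: ys.drop m) := by
  rcases Nat.lt_or_ge xs.length j with hj | hj
  · -- j ≥ xs.length + 1 : entirely in the ys part
    have hd : (xs ++ ',' :: ys).drop j = ys.drop (j - xs.length - 1) := by
      rw [List.drop_append]
      rw [List.drop_eq_nil_of_le (by omega), List.nil_append]
      have h2 : j - xs.length = 1 + (j - xs.length - 1) := by omega
      rw [h2, ← List.drop_drop]
      simp
    rw [hd]
    constructor
    · intro hp
      exact Or.inr ⟨j - xs.length - 1, by omega, hp⟩
    · rintro (⟨hp, hlen⟩ | ⟨m, rfl, hp⟩)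
      · have : 1 ≤ sub.length := List.length_pos_iff.mpr hne
        omega
      · have he : xs.length + 1 + m - xs.length - 1 = m := by omega
        rwa [he]
  · -- j ≤ xs.length
    have hd : (xs ++ ',' :: ys).drop j = xs.drop j ++ ',' :: ys :=
      List.drop_append_of_le_length hj
    rw [hd]
    by_cases hlen : j + sub.length ≤ xs.length
    · constructor
      · intro hp
        refine Or.inl ⟨?_, hlen⟩
        have he : sub = (xs.drop j ++ ',' :: ys).take sub.length := List.prefix_iff_eq_take.mp hp
        rw [List.take_append_of_le_length (by simp; omega)] at he
        rw [he]
        exact List.take_prefix _ _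
      · rintro (⟨hp, -⟩ | ⟨m, rfl, -⟩)
        · exact hp.trans (List.prefix_append _ _)
        · omega
    · -- the occurrence would have to cross the separator: impossible
      constructor
      · intro hp
        exfalso
        have hdlen : (xs.drop j).length = xs.length - j := by simp
        have hidx : xs.length - j < sub.length := by omega
        have hgl : sub[xs.length - j]'hidx = (xs.drop j ++ ',' :: ys)[xs.length - j]'(by simp only [List.length_append, List.length_cons, List.length_drop]; omega) :=
          hp.getElem hidx
        have hc : (xs.drop j ++ ',' :: ys)[xs.length - j]'(by simp only [List.length_append, List.length_cons, List.length_drop]; omega) = ',' := by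
          rw [List.getElem_append_right (by omega)]
          simp [hdlen]
        exact hnc (by rw [← hc, ← hgl]; exact List.getElem_mem hidx)
      · rintro (⟨-, hl⟩ | ⟨m, rfl, -⟩) <;> omega

theorem rfind_append_comma (sub xs ys : List Char) (hne : sub ≠ []) (hnc : ',' ∉ sub) :
    PySem.Chars.rfind (xs ++ ',' :: ys) sub =
      if PySem.Chars.rfind ys sub = -1 then PySem.Chars.rfind xs sub
      else (xs.length : Int) + 1 + PySem.Chars.rfind ys sub := by
  by_cases hy : PySem.Chars.rfind ys sub = -1
  · rw [if_pos hy]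
    have hyall := (rfind_eq_neg_one_iff' ys sub hne).mp hy
    by_cases hx : PySem.Chars.rfind xs sub = -1
    · rw [hx, rfind_eq_neg_one_iff' _ sub hne]
      intro j hp
      rcases (occ_append_comma sub hne hnc xs ys j).mp hp with ⟨hp', -⟩ | ⟨m, -, hp'⟩
      · exact (rfind_eq_neg_one_iff' xs sub hne).mp hx j hp'
      · exact hyall m hp'
    · obtain ⟨p, hep, hp, hmax⟩ := rfind_spec' xs sub hne hx
      rw [hep]
      apply rfind_eq_of _ sub hne
      · rw [occ_append_comma sub hne hnc]
        have hl1 : sub.length ≤ (xs.drop p).length := hp.length_le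
        have hl2 : 1 ≤ sub.length := List.length_pos_iff.mpr hne
        refine Or.inl ⟨hp, by simp at hl1; omega⟩
      · intro j' hj' hp'
        rcases (occ_append_comma sub hne hnc xs ys j').mp hp' with ⟨hp'', -⟩ | ⟨m, -, hp''⟩
        · exact hmax j' hj' hp''
        · exact hyall m hp''
  · rw [if_neg hy]
    obtain ⟨q, heq, hq, hmax⟩ := rfind_spec' ys sub hne hy
    rw [heq]
    have hc : ((xs.length : Int) + 1 + q) = ((xs.length + 1 + q : Nat) : Int) := by push_cast; ring
    rw [hc]
    apply rfind_eq_of _ sub hne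
    · rw [occ_append_comma sub hne hnc]
      exact Or.inr ⟨q, rfl, hq⟩
    · intro j' hj' hp'
      rcases (occ_append_comma sub hne hnc xs ys j').mp hp' with ⟨-, hl⟩ | ⟨m, hm, hp''⟩
      · have : 1 ≤ sub.length := List.length_pos_iff.mpr hne
        omega
      · exact hmax m (by omega) hp''

theorem rfind_comma_append (xs ys : List Char) :
    PySem.Chars.rfind (xs ++ ',' :: ys) [','] =
      if PySem.Chars.rfind ys [','] = -1 then (xs.length : Int)
      else (xs.length : Int) + 1 + PySem.Chars.rfind ys [','] := by
  have hne : ([','] : List Char) ≠ [] := by simp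
  by_cases hy : PySem.Chars.rfind ys [','] = -1
  · rw [if_pos hy]
    have hyall := (rfind_eq_neg_one_iff' ys [','] hne).mp hy
    apply rfind_eq_of _ _ hne
    · rw [single_prefix_drop]
      simp
    · intro j' hj' hp'
      rw [single_prefix_drop, List.getElem?_append_right (by omega)] at hp'
      have hm : j' - xs.length = (j' - xs.length - 1) + 1 := by omega
      rw [hm, List.getElem?_cons_succ] at hp'
      exact hyall (j' - xs.length - 1) ((single_prefix_drop ',' ys _).mpr hp')
  · rw [if_neg hy]
    obtain ⟨q, heq, hq, hmax⟩ := rfind_spec' ys [','] hne hy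
    rw [heq]
    have hc : ((xs.length : Int) + 1 + q) = ((xs.length + 1 + q : Nat) : Int) := by push_cast; ring
    rw [hc]
    apply rfind_eq_of _ _ hne
    · rw [single_prefix_drop, List.getElem?_append_right (by omega)]
      have h1 : xs.length + 1 + q - xs.length = q + 1 := by omega
      rw [h1, List.getElem?_cons_succ]
      exact (single_prefix_drop ',' ys q).mp hq
    · intro j' hj' hp'
      rw [single_prefix_drop, List.getElem?_append_right (by omega)] at hp'
      have hm : j' - xs.length = (j' - xs.length - 1) + 1 := by omega
      rw [hm, List.getElem?_cons_succ] at hp'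
      exact hmax (j' - xs.length - 1) (by omega) ((single_prefix_drop ',' ys _).mpr hp')

-- ----- slices by nonnegative ints / -1 -----

theorem slice_nat_neg_one {α : Type} (L : List α) (a : Nat) :
    PySem.List.slice L (some (a : Int)) (some (-1)) = (L.drop a).dropLast := by
  unfold PySem.List.slice PySem.List.clampIdx
  dsimp only
  rw [if_neg (by omega : ¬ (a : Int) < 0), if_pos (by omega : (-1 : Int) < 0)]
  rcases Nat.eq_zero_or_pos L.length with h0 | hpos
  · rw [List.length_eq_zero_iff] at h0
    subst h0
    simp
  · rw [if_neg (by omega : ¬ (L.length : Int) + -1 < 0)]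
    have h1 : ((L.length : Int) + -1).toNat = L.length - 1 := by omega
    have h2 : ((a : Int)).toNat = a := by omega
    rw [h1, h2]
    rcases Nat.lt_or_ge L.length a with hgt | hle
    · rw [Nat.min_eq_right (by omega), List.drop_length]
      rw [List.drop_eq_nil_of_le (by omega)]
      simp
    · rw [Nat.min_eq_left hle, List.dropLast_eq_take, List.take_drop, List.take_drop, List.length_drop]
      congr 2
      omega

theorem slice_map {α β : Type} (g : α → β) (L : List α) (a? b? : Option Int) :
    PySem.List.slice (L.map g) a? b? = (PySem.List.slice L a? b?).map g := by
  unfold PySem.List.slice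
  rw [List.length_map, List.map_take, List.map_drop]

theorem splitOn_go_spec (fuel : Nat) :
    ∀ (l cur : List Char) (acc : List (List Char)), l.length ≤ fuel → ',' ∉ cur →
    ∃ ps, PySem.Chars.splitOn.go [','] fuel l cur acc = acc.reverse ++ ps ∧ ps ≠ [] ∧
      (∀ f ∈ ps, ',' ∉ f) ∧ PySem.Chars.join [','] ps = cur.reverse ++ l := by
  induction fuel with
  | zero =>
    intro l cur acc hl hc
    have hl0 : l = [] := List.length_eq_zero_iff.mp (by omega)
    subst hl0
    refine ⟨[cur.reverse], ?_, by simp, by simpa using hc, by simp [PySem.Chars.join_singleton]⟩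
    simp [PySem.Chars.splitOn.go]
  | succ fuel ih =>
    intro l cur acc hl hc
    match l with
    | [] =>
      refine ⟨[cur.reverse], ?_, by simp, by simpa using hc, by simp [PySem.Chars.join_singleton]⟩
      simp [PySem.Chars.splitOn.go]
    | c :: rest =>
      rw [PySem.Chars.splitOn.go]
      by_cases hcomma : c = ','
      · subst hcomma
        rw [if_pos (by simp [List.isPrefixOf])]
        obtain ⟨ps, hgo, hne, hcf, hjoin⟩ := ih rest [] (cur.reverse :: acc) (by simpa using hl) (by simp)
        have hdrop : List.drop ([','] : List Char).length (',' :: rest) = rest := by simp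
        rw [hdrop, hgo]
        refine ⟨cur.reverse :: ps, by simp, by simp, ?_, ?_⟩
        · intro f hf
          rcases List.mem_cons.mp hf with rfl | hm
          · simpa using hc
          · exact hcf f hm
        · match ps, hne with
          | q :: ps', _ =>
            rw [PySem.Chars.join_cons_cons]
            simp at hjoin
            simp [hjoin]
      · rw [if_neg (by simp [List.isPrefixOf]; exact fun h => hcomma h.symm)]
        obtain ⟨ps, hgo, hne, hcf, hjoin⟩ := ih rest (c :: cur) acc (by simpa using hl)
          (by
          intro hm
          rcases List.mem_cons.mp hm with h | h
          · exact hcomma h.symm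
          · exact hc h)
        rw [hgo]
        refine ⟨ps, rfl, hne, hcf, ?_⟩
        rw [hjoin]
        simp

theorem splitOn_comma_spec (cs : List Char) :
    PySem.Chars.splitOn cs [','] ≠ [] ∧ (∀ f ∈ PySem.Chars.splitOn cs [','], ',' ∉ f) ∧
      PySem.Chars.join [','] (PySem.Chars.splitOn cs [',']) = cs := by
  unfold PySem.Chars.splitOn
  obtain ⟨ps, hgo, hne, hcf, hjoin⟩ := splitOn_go_spec (cs.length + 1) cs [] [] (by omega) (by simp)
  rw [hgo]
  exact ⟨by simpa using hne, by simpa using hcf, by simpa using hjoin⟩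

-- ----- lastHitC structure -----

theorem lastHitC_none_iff (R : List (List Char)) :
    lastHitC R = none ↔ ∀ f ∈ R, PySem.Chars.isIn ['C', 'W', 'E'] f = false := by
  induction R with
  | nil => simp [lastHitC]
  | cons f rest ih =>
    rw [lastHitC]
    cases h : lastHitC rest with
    | some i =>
      dsimp only
      simp only [reduceCtorEq, false_iff]
      intro hall
      have h2 := ih.mpr (fun g hg => hall g (List.mem_cons_of_mem _ hg))
      rw [h] at h2
      exact absurd h2 (by simp)
    | none =>
      dsimp only
      constructor
      · intro hc
        split_ifs at hc with hf
        intro g hg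
        rcases List.mem_cons.mp hg with rfl | hm
        · simpa using hf
        · exact (ih.mp h) g hm
      · intro hall
        rw [if_neg (by simp [hall f (by simp)])]

theorem lastHitC_some_mem (R : List (List Char)) :
    ∀ (i : Nat), lastHitC R = some i → ∃ f ∈ R, PySem.Chars.isIn ['C', 'W', 'E'] f = true := by
  induction R with
  | nil => intro i h; exact absurd h (by simp [lastHitC])
  | cons f rest ih =>
    intro i h
    rw [lastHitC] at h
    cases hr : lastHitC rest with
    | some k =>
      obtain ⟨g, hg, hin⟩ := ih k hr
      exact ⟨g, List.mem_cons_of_mem _ hg, hin⟩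
    | none =>
      rw [hr] at h
      split_ifs at h with hf
      exact ⟨f, by simp, hf⟩

theorem mem_infix_join (f : List Char) (R : List (List Char)) (hf : f ∈ R) :
    f <:+: PySem.Chars.join [','] R := by
  induction R with
  | nil => simp at hf
  | cons g rest ih =>
    rcases List.mem_cons.mp hf with rfl | hm
    · cases rest with
      | nil => rw [PySem.Chars.join_singleton]
      | cons q t =>
        rw [PySem.Chars.join_cons_cons]
        exact ((f.prefix_append _).trans (List.prefix_append _ _)).isInfix
    · cases rest with
      | nil => simp at hm
      | cons q t =>
        rw [PySem.Chars.join_cons_cons]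
        exact (ih hm).trans (List.suffix_append _ _).isInfix

theorem rfind_join_CWE_eq_neg_one (R : List (List Char)) (hcf : ∀ f ∈ R, ',' ∉ f)
    (h : ∀ f ∈ R, PySem.Chars.isIn ['C', 'W', 'E'] f = false) :
    PySem.Chars.rfind (PySem.Chars.join [','] R) ['C', 'W', 'E'] = -1 := by
  induction R with
  | nil =>
    rw [PySem.Chars.join_nil, rfind_eq_neg_one_iff' _ _ (by simp)]
    intro j hp
    simp at hp
  | cons f rest ih =>
    have hf : ¬ (['C','W','E'] : List Char) <:+: f := by
      rw [← PySem.Chars.isIn_iff_infix]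
      simp [h f (by simp)]
    cases rest with
    | nil =>
      rw [PySem.Chars.join_singleton, rfind_eq_neg_one_iff' _ _ (by simp)]
      intro j hp
      exact hf (hp.isInfix.trans (List.drop_suffix j f).isInfix)
    | cons q t =>
      rw [PySem.Chars.join_cons_cons, List.append_assoc, List.singleton_append,
        rfind_eq_neg_one_iff' _ _ (by simp)]
      intro j hp
      rcases (occ_append_comma _ (by simp) (by decide) f _ j).mp hp with ⟨hp', -⟩ | ⟨m, -, hp'⟩
      · exact hf (hp'.isInfix.trans (List.drop_suffix j f).isInfix)
      · have ihr := ih (fun g hg => hcf g (List.mem_cons_of_mem _ hg))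
          (fun g hg => h g (List.mem_cons_of_mem _ hg))
        exact (rfind_eq_neg_one_iff' _ _ (by simp)).mp ihr m hp'

theorem comma_mem_join_of_two (R : List (List Char)) (h2 : 2 ≤ R.length) :
    PySem.Chars.rfind (PySem.Chars.join [','] R) [','] ≠ -1 := by
  match R, h2 with
  | f :: q :: t, _ =>
    rw [PySem.Chars.join_cons_cons, List.append_assoc, List.singleton_append,
      rfind_comma_append]
    split_ifs with h
    · simp
    · have := rfind_spec' _ [','] (by simp) h
      obtain ⟨j, he, -, -⟩ := this
      rw [he]
      intro hc
      omega

theorem take_rfind_join (R : List (List Char)) (hne : R ≠ []) (hcf : ∀ f ∈ R, ',' ∉ f) :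
    (R.length = 1 → PySem.Chars.rfind (PySem.Chars.join [','] R) [','] = -1) ∧
    (2 ≤ R.length → ∃ m : Nat, PySem.Chars.rfind (PySem.Chars.join [','] R) [','] = (m : Int) ∧
      (PySem.Chars.join [','] R).take m = PySem.Chars.join [','] R.dropLast) := by
  induction R with
  | nil => exact absurd rfl hne
  | cons f rest ih =>
    constructor
    · intro h1
      have : rest = [] := by
        cases rest
        · rfl
        · simp at h1
      subst this
      rw [PySem.Chars.join_singleton]
      exact rfind_comma_eq_neg_one f (hcf f (by simp))
    · intro h2
      match rest, h2 with
      | q :: t, _ =>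
        rw [PySem.Chars.join_cons_cons, List.append_assoc, List.singleton_append,
          rfind_comma_append]
        by_cases hq : PySem.Chars.rfind (PySem.Chars.join [','] (q :: t)) [','] = -1
        · rw [if_pos hq]
          refine ⟨f.length, rfl, ?_⟩
          have ht : t = [] := by
            cases t with
            | nil => rfl
            | cons r u =>
              exact absurd hq (comma_mem_join_of_two _ (by simp))
          subst ht
          rw [PySem.Chars.join_singleton]
          simp [PySem.Chars.join_singleton]
        · rw [if_neg hq]
          obtain ⟨ihq1, ihq2⟩ := ih (by simp) (fun g hg => hcf g (List.mem_cons_of_mem _ hg))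
          have hlen2 : 2 ≤ (q :: t).length := by
            cases t with
            | nil =>
              exfalso
              exact hq (by rw [PySem.Chars.join_singleton]; exact rfind_comma_eq_neg_one q (hcf q (by simp)))
            | cons r u => simp
          obtain ⟨m, hm, htake⟩ := ihq2 hlen2
          rw [hm]
          refine ⟨f.length + 1 + m, by push_cast; ring, ?_⟩
          have hdl : (f :: q :: t).dropLast = f :: (q :: t).dropLast := by
            simp
          rw [hdl]
          have hX : ∃ a b, (q :: t).dropLast = a :: b := by
            match t, hlen2 with
            | r :: u, _ => exact ⟨q, (r :: u).dropLast, by simp⟩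
          obtain ⟨a, b, hab⟩ := hX
          rw [hab, PySem.Chars.join_cons_cons, List.append_assoc, List.singleton_append,
            ← hab, ← htake]
          have harr : f.length + 1 + m = f.length + (m + 1) := by omega
          rw [harr, List.take_append]
          simp [List.take_succ_cons, List.take_of_length_le]

-- ----- the master lemma: B's string-level core, computed on a join of comma-free fields -----

theorem bcore_single (f : List Char) (hcf : ',' ∉ f) :
    bcoreC f = if PySem.Chars.isIn ['C', 'W', 'E'] f then some [] else none := by
  unfold bcoreC
  by_cases hin : PySem.Chars.isIn ['C', 'W', 'E'] f = true
  · have hpos : PySem.Chars.rfind f ['C', 'W', 'E'] ≠ -1 := by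
      intro hc
      rw [rfind_ne_neg_one_iff _ _ (by simp)] at hc
      simp [hin] at hc
    rw [if_neg hpos, if_pos hin]
    obtain ⟨p, hep, hp, -⟩ := rfind_spec' f ['C', 'W', 'E'] (by simp) hpos
    have htail : bcoreTail f = f.drop (p + 3) := by
      unfold bcoreTail
      rw [hep]
      have hc : ((p : Int) + 3) = ((p + 3 : Nat) : Int) := by push_cast; ring
      rw [hc, PySem.List.slice_from_natCast]
    rw [htail]
    unfold bcoreCtx
    rw [find_comma_eq_neg_one _ (fun hm => hcf (List.mem_of_mem_drop hm))]
    simp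
  · have hneg : PySem.Chars.rfind f ['C', 'W', 'E'] = -1 :=
      (rfind_ne_neg_one_iff _ _ (by simp)).mpr (by simpa using hin)
    rw [if_pos hneg, if_neg hin]

-- the context that B cuts out of g ++ ',' :: join R (g comma-free) is exactly join R.dropLast
theorem bcoreCtx_tail (g : List Char) (R : List (List Char)) (hg : ',' ∉ g)
    (hne : R ≠ []) (hcf : ∀ f ∈ R, ',' ∉ f) :
    bcoreCtx (g ++ ',' :: PySem.Chars.join [','] R) = PySem.Chars.join [','] R.dropLast := by
  unfold bcoreCtx
  rw [find_comma_append _ _ hg]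
  rw [if_neg (by omega : ¬ (g.length : Int) = -1)]
  rw [rfind_comma_append]
  obtain ⟨h1, h2⟩ := take_rfind_join R hne hcf
  match R, hne with
  | [r], _ =>
    rw [h1 rfl, if_pos rfl]
    have hc : (g.length : Int) + 1 = ((g.length + 1 : Nat) : Int) := by push_cast; ring
    rw [hc, PySem.List.slice_natCast]
    simp
  | r0 :: r1 :: u, _ =>
    obtain ⟨m, hm, htake⟩ := h2 (by simp)
    have hmne : PySem.Chars.rfind (PySem.Chars.join [','] (r0 :: r1 :: u)) [','] ≠ -1 := by
      rw [hm]; omega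
    rw [if_neg hmne, hm]
    have hc5 : (g.length : Int) + 1 + (m : Int) = ((g.length + 1 + m : Nat) : Int) := by push_cast; ring
    have hc6 : (g.length : Int) + 1 = ((g.length + 1 : Nat) : Int) := by push_cast; ring
    rw [hc5, hc6, PySem.List.slice_natCast]
    have hdrop : (g ++ ',' :: PySem.Chars.join [','] (r0 :: r1 :: u)).drop (g.length + 1)
        = PySem.Chars.join [','] (r0 :: r1 :: u) := by
      rw [List.drop_append]
      simp
    rw [hdrop]
    have harith : g.length + 1 + m - (g.length + 1) = m := by omega
    rw [harith, htake]

theorem bcore_master (F : List (List Char)) (hne : F ≠ []) (hcf : ∀ f ∈ F, ',' ∉ f) :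
    bcoreC (PySem.Chars.join [','] F)
      = (lastHitC F).map (fun (i : Nat) =>
          PySem.Chars.join [','] (PySem.List.slice F (some ((i : Int) + 1)) (some (-1)))) := by
  induction F with
  | nil => exact absurd rfl hne
  | cons f rest ih =>
    cases rest with
    | nil =>
      rw [PySem.Chars.join_singleton, bcore_single f (hcf f (by simp)), lastHitC]
      cases hin : PySem.Chars.isIn ['C', 'W', 'E'] f with
      | false => simp [lastHitC]
      | true =>
        simp only [lastHitC, if_true, Option.map_some]
        have h1 : ((0 : Nat) : Int) + 1 = ((1 : Nat) : Int) := by norm_num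
        rw [h1, slice_nat_neg_one [f] 1]
        simp [PySem.Chars.join_nil]
    | cons q t =>
      have hjoin : PySem.Chars.join [','] (f :: q :: t)
          = f ++ ',' :: PySem.Chars.join [','] (q :: t) := by
        rw [PySem.Chars.join_cons_cons, List.append_assoc, List.singleton_append]
      rw [hjoin]
      have hcfr : ∀ g ∈ q :: t, ',' ∉ g := fun g hg => hcf g (List.mem_cons_of_mem _ hg)
      cases hLH : lastHitC (q :: t) with
      | some i' =>
        -- the last CWE field is inside the tail: B works entirely inside join (q :: t)
        have hcw : PySem.Chars.rfind (PySem.Chars.join [','] (q :: t)) ['C', 'W', 'E'] ≠ -1 := by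
          intro hc
          rw [rfind_ne_neg_one_iff _ _ (by simp)] at hc
          obtain ⟨g, hg, hin⟩ := lastHitC_some_mem _ i' hLH
          have : PySem.Chars.isIn ['C', 'W', 'E'] (PySem.Chars.join [','] (q :: t)) = true := by
            rw [PySem.Chars.isIn_iff_infix]
            exact ((PySem.Chars.isIn_iff_infix _ _).mp hin).trans (mem_infix_join g _ hg)
          rw [hc] at this
          exact Bool.noConfusion this
        obtain ⟨p', hep', hp', -⟩ := rfind_spec' _ ['C', 'W', 'E'] (by simp) hcw
        have hshift : PySem.Chars.rfind (f ++ ',' :: PySem.Chars.join [','] (q :: t)) ['C', 'W', 'E']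
            = (f.length : Int) + 1 + (p' : Int) := by
          rw [rfind_append_comma _ _ _ (by simp) (by decide), if_neg hcw, hep']
        have heqtail : bcoreTail (f ++ ',' :: PySem.Chars.join [','] (q :: t))
            = bcoreTail (PySem.Chars.join [','] (q :: t)) := by
          unfold bcoreTail
          rw [hshift, hep']
          have hc1 : ((f.length : Int) + 1 + (p' : Int) + 3) = ((f.length + 1 + p' + 3 : Nat) : Int) := by push_cast; ring
          have hc2 : ((p' : Int) + 3) = ((p' + 3 : Nat) : Int) := by push_cast; ring
          rw [hc1, hc2, PySem.List.slice_from_natCast, PySem.List.slice_from_natCast]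
          have harr : f.length + 1 + p' + 3 = f.length + (1 + (p' + 3)) := by omega
          rw [harr, ← List.drop_drop, ← List.drop_drop, List.drop_append]
          simp
        unfold bcoreC
        rw [hshift, if_neg (by omega : ¬ (f.length : Int) + 1 + (p' : Int) = -1), heqtail]
        have hres := ih (by simp) hcfr
        unfold bcoreC at hres
        rw [hep', if_neg (by omega : ¬ ((p' : Nat) : Int) = -1), hLH] at hres
        simp only [Option.map_some, Option.some.injEq] at hres
        rw [lastHitC, hLH]
        simp only [Option.map_some, Option.some.injEq]
        rw [hres]
        -- slices of the field list agree
        have hc3 : (((i' + 1 : Nat)) : Int) + 1 = (((i' + 2 : Nat)) : Int) := by push_cast; ring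
        have hc4 : ((i' : Int) + 1) = (((i' + 1 : Nat)) : Int) := by push_cast; ring
        rw [hc3, hc4, slice_nat_neg_one, slice_nat_neg_one]
        rfl
      | none =>
        have hnocw : ∀ g ∈ q :: t, PySem.Chars.isIn ['C', 'W', 'E'] g = false :=
          (lastHitC_none_iff _).mp hLH
        have hcs' : PySem.Chars.rfind (PySem.Chars.join [','] (q :: t)) ['C', 'W', 'E'] = -1 :=
          rfind_join_CWE_eq_neg_one _ hcfr hnocw
        by_cases hf : PySem.Chars.isIn ['C', 'W', 'E'] f = true
        · -- the hit is in the head field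
          have hfx : PySem.Chars.rfind f ['C', 'W', 'E'] ≠ -1 := by
            intro hc
            rw [rfind_ne_neg_one_iff _ _ (by simp)] at hc
            simp [hf] at hc
          obtain ⟨p, hep, hp, -⟩ := rfind_spec' f ['C', 'W', 'E'] (by simp) hfx
          have hplen : p + 3 ≤ f.length := by
            have := hp.length_le
            simp at this
            omega
          have hpos : PySem.Chars.rfind (f ++ ',' :: PySem.Chars.join [','] (q :: t)) ['C', 'W', 'E'] = ((p : Nat) : Int) := by
            rw [rfind_append_comma _ _ _ (by simp) (by decide), if_pos hcs', hep]
          have htail : bcoreTail (f ++ ',' :: PySem.Chars.join [','] (q :: t))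
              = f.drop (p + 3) ++ ',' :: PySem.Chars.join [','] (q :: t) := by
            unfold bcoreTail
            rw [hpos]
            have hc2 : ((p : Int) + 3) = ((p + 3 : Nat) : Int) := by push_cast; ring
            rw [hc2, PySem.List.slice_from_natCast]
            exact List.drop_append_of_le_length hplen
          unfold bcoreC
          rw [hpos, if_neg (by omega : ¬ ((p : Nat) : Int) = -1), htail]
          rw [bcoreCtx_tail _ _ (fun hm => hcf f (by simp) (List.mem_of_mem_drop hm)) (by simp) hcfr]
          rw [lastHitC, hLH]
          simp only [hf, if_true, Option.map_some, Option.some.injEq]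
          have : (((0 : Nat)) : Int) + 1 = ((1 : Nat) : Int) := by norm_num
          rw [this, slice_nat_neg_one]
          rfl
        · -- no CWE anywhere
          have hfneg : PySem.Chars.rfind f ['C', 'W', 'E'] = -1 :=
            (rfind_ne_neg_one_iff _ _ (by simp)).mpr (by simpa using hf)
          have hall : PySem.Chars.rfind (f ++ ',' :: PySem.Chars.join [','] (q :: t)) ['C', 'W', 'E'] = -1 := by
            rw [rfind_append_comma _ _ _ (by simp) (by decide), if_pos hcs', hfneg]
          unfold bcoreC
          rw [hall, if_pos rfl, lastHitC, hLH]
          simp [hf]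

def wrapC (ctx : List Char) : String :=
  String.ofList ('"' :: (PySem.Chars.strip (PySem.Chars.stripChars ctx ['"']) ++ ['"']))

theorem parseContext_alt_char (line : String) :
    parseContext_alt line = (bcoreC line.toList).map wrapC := by
  unfold parseContext_alt bcoreC
  dsimp only
  rw [PySem.Str.rfind_eq]
  have hsub : ("CWE" : String).toList = ['C', 'W', 'E'] := by decide
  rw [hsub]
  by_cases hneg : PySem.Chars.rfind line.toList ['C', 'W', 'E'] = -1
  · rw [if_pos hneg, if_pos hneg]
    rfl
  · rw [if_neg hneg, if_neg hneg]
    simp only [Option.map_some, Option.some.injEq]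
    apply String.toList_inj.mp
    have htail : (PySem.Str.slice line (some (PySem.Chars.rfind line.toList ['C', 'W', 'E'] + 3)) none).toList
        = bcoreTail line.toList := by
      rw [PySem.Str.toList_slice, PySem.Chars.slice_eq_listSlice]
      rfl
    have hcomma : ("," : String).toList = [','] := by decide
    have hctx : (if PySem.Str.find (PySem.Str.slice line (some (PySem.Chars.rfind line.toList ['C', 'W', 'E'] + 3)) none) "," = -1 then ""
          else PySem.Str.slice (PySem.Str.slice line (some (PySem.Chars.rfind line.toList ['C', 'W', 'E'] + 3)) none)
            (some (PySem.Str.find (PySem.Str.slice line (some (PySem.Chars.rfind line.toList ['C', 'W', 'E'] + 3)) none) "," + 1))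
            (some (PySem.Str.rfind (PySem.Str.slice line (some (PySem.Chars.rfind line.toList ['C', 'W', 'E'] + 3)) none) ","))).toList
        = bcoreCtx (bcoreTail line.toList) := by
      rw [bcoreCtx, PySem.Str.find_eq, htail, hcomma]
      by_cases hj : PySem.Chars.find (bcoreTail line.toList) [','] = -1
      · rw [if_pos hj, if_pos hj]
        rfl
      · rw [if_neg hj, if_neg hj]
        rw [PySem.Str.toList_slice, PySem.Chars.slice_eq_listSlice, PySem.Str.rfind_eq, htail, hcomma]
    rw [wrapC]
    have hq : ("\"" : String).toList = ['"'] := by decide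
    simp only [String.toList_append, PySem.Str.toList_strip, PySem.Str.toList_stripChars,
      String.toList_ofList, hctx, hq]
    rw [List.append_assoc, List.singleton_append]

theorem lastHitS_eq_lastHitC (F : List (List Char)) :
    lastHitS (F.map String.ofList) = lastHitC F := by
  induction F with
  | nil => rfl
  | cons f rest ih =>
    rw [List.map_cons, lastHitS, lastHitC, ih]
    cases lastHitC rest with
    | some i => rfl
    | none =>
      have h1 : PySem.Str.isIn "CWE" (String.ofList f) = PySem.Chars.isIn ['C', 'W', 'E'] f := by
        rw [PySem.Str.isIn_eq]
        simp only [String.toList_ofList]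
        rfl
      rw [h1]

theorem lastHitS_snoc (L : List String) (f : String) :
    lastHitS (L ++ [f]) = if PySem.Str.isIn "CWE" f then some L.length else lastHitS L := by
  induction L with
  | nil =>
    rw [List.nil_append, lastHitS, lastHitS]
    split_ifs <;> rfl
  | cons g L ih =>
    rw [List.cons_append, lastHitS, ih, lastHitS]
    by_cases hf : PySem.Str.isIn "CWE" f = true
    · rw [if_pos hf, if_pos hf]
      rfl
    · rw [if_neg hf, if_neg hf]

theorem foldl_eq_lastHitS (cs : List String) (k : Nat) (hk : k ≤ cs.length) :
    (PySem.List.pyRange 0 (k : Int)).foldl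
        (fun acc i => if PySem.Str.isIn "CWE" (PySem.List.pyGetD cs i "") then some i else acc) none
      = (lastHitS (cs.take k)).map (fun i : Nat => (i : Int)) := by
  induction k with
  | zero => simp [PySem.List.pyRange, lastHitS]
  | succ k ih =>
    have hc : ((k + 1 : Nat) : Int) = (k : Int) + 1 := by push_cast; ring
    rw [hc, PySem.List.pyRange_one_append 0 (k : Int) ((k : Int) + 1) (by omega) (by omega),
      List.foldl_append]
    have hsing : PySem.List.pyRange (k : Int) ((k : Int) + 1) = [(k : Int)] := by
      rw [PySem.List.pyRange_one_cons (by omega)]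
      simp [PySem.List.pyRange]
    rw [hsing, ih (by omega)]
    simp only [List.foldl_cons, List.foldl_nil]
    have hklt : k < cs.length := by omega
    have htake : cs.take (k + 1) = cs.take k ++ [cs[k]] := by
      rw [List.take_add_one, List.getElem?_eq_getElem hklt]
      rfl
    rw [htake, lastHitS_snoc]
    rw [PySem.List.pyGetD_natCast, List.getD_eq_getElem cs "" hklt]
    by_cases hf : PySem.Str.isIn "CWE" cs[k] = true
    · rw [if_pos hf, if_pos hf]
      simp [List.length_take, Nat.min_eq_left (by omega : k ≤ cs.length)]
    · rw [if_neg hf, if_neg hf]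

theorem wrapC_eq_pvAssemble (fields_c : List (List Char)) (n : Nat) :
    wrapC (PySem.Chars.join [','] (PySem.List.slice fields_c (some ((n : Int) + 1)) (some (-1))))
      = pvAssemble (fields_c.map String.ofList) ((n : Nat) : Int) := by
  apply String.toList_inj.mp
  unfold wrapC pvAssemble
  have hq : ("\"" : String).toList = ['"'] := by decide
  have hcomma : ("," : String).toList = [','] := by decide
  have hmap : List.map String.toList (PySem.List.slice (List.map String.ofList fields_c) (some ((n : Int) + 1)) (some (-1)))
      = PySem.List.slice fields_c (some ((n : Int) + 1)) (some (-1)) := by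
    rw [slice_map, List.map_map]
    have hfun : String.toList ∘ String.ofList = id := funext fun l => by simp
    rw [hfun, List.map_id]
  simp only [String.toList_append, PySem.Str.toList_strip, PySem.Str.toList_stripChars,
    String.toList_ofList, PySem.Str.toList_join, hq, hcomma, hmap]
  rw [List.append_assoc, List.singleton_append]

theorem parseContext_alt_eq_fold (line : String) :
    parseContext_alt line =
      (((PySem.List.pyRange 0 (((PySem.Str.split? line ",").getD []).length)).foldl
        (fun acc i => if PySem.Str.isIn "CWE" (PySem.List.pyGetD ((PySem.Str.split? line ",").getD []) i "") then some i else acc)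
        none).elim none (fun i => some (pvAssemble ((PySem.Str.split? line ",").getD []) i))) := by
  have hsplit : (PySem.Str.split? line ",").getD []
      = (PySem.Chars.splitOn line.toList [',']).map String.ofList := by
    unfold PySem.Str.split? PySem.Chars.split?
    have hcomma : ("," : String).toList = [','] := by decide
    rw [hcomma]
    simp
  obtain ⟨hne, hcf, hjoin⟩ := splitOn_comma_spec line.toList
  rw [hsplit, parseContext_alt_char]
  conv_lhs => rw [← hjoin]
  rw [bcore_master _ hne hcf]
  rw [foldl_eq_lastHitS _ _ (le_refl _), List.take_length, lastHitS_eq_lastHitC]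
  cases lastHitC (PySem.Chars.splitOn line.toList [',']) with
  | none => rfl
  | some n =>
    simp only [Option.map_some, Option.elim]
    rw [wrapC_eq_pvAssemble]

-- ---------- the final comparison (A's 1..n-1 fold vs B's 0..n-1 fold) ----------

theorem parseContext_eq_of_not_D (line : String) (hnD : ¬ D_parseContext line) :
    parseContext line = parseContext_alt line := by
  rw [parseContext_char, parseContext_alt_eq_fold]
  set cs := (PySem.Str.split? line ",").getD [] with hcs
  rcases Nat.eq_zero_or_pos cs.length with h | h
  · rw [h]
    norm_num [PySem.List.pyRange]
  · have hB : PySem.List.pyRange 0 (cs.length : Int) = 0 :: PySem.List.pyRange 1 (cs.length : Int) := by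
      rw [PySem.List.pyRange_one_cons (by exact_mod_cast h)]
      norm_num
    rw [hB, List.foldl_cons,
      foldl_lastIf _ _ (if PySem.Str.isIn "CWE" (PySem.List.pyGetD cs 0 "") then some 0 else none)]
    cases hF : (PySem.List.pyRange 1 (cs.length : Int)).foldl
        (fun acc i => if PySem.Str.isIn "CWE" (PySem.List.pyGetD cs i "") then some i else acc) none with
    | some i => simp [pvAssemble]
    | none =>
      have hall : ∀ i : Nat, i < cs.length → 1 ≤ i →
          PySem.Str.isIn "CWE" (cs.getD i "") = false := by
        intro i hi h1
        have := (foldl_lastIf_none_iff _ _).mp hF (i : Int)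
          ((PySem.List.mem_pyRange_iff_of_pos (by omega) _).mpr ⟨by omega, by omega, by omega⟩)
        rwa [PySem.List.pyGetD_natCast] at this
      have h0 : PySem.Str.isIn "CWE" (cs.getD 0 "") = false := by
        by_contra hc
        exact hnD ((D_parseContext_iff line).mpr ⟨by simpa using (Bool.not_eq_false _).mp hc, hall⟩)
      have e : PySem.List.pyGetD cs (0 : Int) "" = cs.getD 0 "" := PySem.List.pyGetD_natCast cs 0 ""
      simp at h0
      simp [e, h0]

-- ===== VERDICT (by name: the statement is the Claim_ definition above) =====
theorem parseContext_spec : Claim_unchanged_parseContext := by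
  intro line _
  unfold Spec_parseContext
  exact fun hnD => parseContext_eq_of_not_D line hnD

theorem parseContext_changed : Claim_changed_parseContext := by
  unfold Claim_changed_parseContext; decide

theorem parseContext_tight : Claim_exact_parseContext := by
  intro line _ hD
  rcases (D_parseContext_iff line).mp hD with ⟨h0, hall⟩
  rw [parseContext_char, parseContext_alt_eq_fold]
  set cs := (PySem.Str.split? line ",").getD [] with hcs
  have hlen : 0 < cs.length := by
    rcases Nat.eq_zero_or_pos cs.length with hz | hz
    · rw [List.length_eq_zero_iff] at hz
      rw [hz] at h0
      exact absurd h0 (by decide)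
    · exact hz
  have hF : (PySem.List.pyRange 1 (cs.length : Int)).foldl
      (fun acc i => if PySem.Str.isIn "CWE" (PySem.List.pyGetD cs i "") then some i else acc) none = none := by
    rw [foldl_lastIf_none_iff]
    intro i hi
    rw [PySem.List.mem_pyRange_iff_of_pos (by omega)] at hi
    obtain ⟨h1, h2, -⟩ := hi
    have : i = ((i.toNat : Nat) : Int) := by omega
    rw [this, PySem.List.pyGetD_natCast]
    exact hall i.toNat (by omega) (by omega)
  have hB : PySem.List.pyRange 0 (cs.length : Int) = 0 :: PySem.List.pyRange 1 (cs.length : Int) := by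
    rw [PySem.List.pyRange_one_cons (by exact_mod_cast hlen)]
    norm_num
  rw [hB, List.foldl_cons,
    foldl_lastIf _ _ (if PySem.Str.isIn "CWE" (PySem.List.pyGetD cs 0 "") then some 0 else none), hF]
  have e : PySem.List.pyGetD cs (0 : Int) "" = cs.getD 0 "" := PySem.List.pyGetD_natCast cs 0 ""
  simp at h0
  simp [e, h0]
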